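-- pv_equiv track=rewrite | github.com/Scotts-Thoughts/data_objects | scrape_moves.py | get_type_for_gen
-- ===== SOURCE A (Python) =====
-- VERSION_GROUP_TO_GEN = {
--     "red-blue": 1,
--     "yellow": 1,
--     "gold-silver": 2,
--     "crystal": 2,
--     "ruby-sapphire": 3,
--     "firered-leafgreen": 3,
--     "emerald": 3,
--     "diamond-pearl": 4,
--     "heartgold-soulsilver": 4,
--     "platinum": 4,
--     "black-white": 5,
--     "black-2-white-2": 5,
--     "x-y": 6,
--     "omega-ruby-alpha-sapphire": 6,
--     "sun-moon": 7,
--     "ultra-sun-ultra-moon": 7,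
--     "lets-go-pikachu-lets-go-eevee": 7,
--     "sword-shield": 8,
--     "brilliant-diamond-and-shining-pearl": 8,
--     "legends-arceus": 8,
--     "scarlet-violet": 9,
--     "the-teal-mask": 9,
--     "the-indigo-disk": 9,
-- }
--
-- VARIANT_VERSION_GROUPS = {
--     "lets-go-pikachu-lets-go-eevee",
--     "legends-arceus",
-- }
--
-- TYPE_MAP = {
--     "normal": "Normal",
--     "fire": "Fire",
--     "water": "Water",
--     "electric": "Electric",
--     "grass": "Grass",
--     "ice": "Ice",
--     "fighting": "Fighting",
--     "poison": "Poison",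
--     "ground": "Ground",
--     "flying": "Flying",
--     "psychic": "Psychic",
--     "bug": "Bug",
--     "rock": "Rock",
--     "ghost": "Ghost",
--     "dragon": "Dragon",
--     "dark": "Dark",
--     "steel": "Steel",
--     "fairy": "Fairy",
--     "stellar": "Stellar",
--     "shadow": "Shadow",
-- }
--
-- def _vg_name(pv: dict) -> str:
--     return (pv.get("version_group") or {}).get("name", "")
--
-- def _vg_gen(pv: dict) -> int:
--     return VERSION_GROUP_TO_GEN.get(_vg_name(pv), 0)
--
-- def get_type_for_gen(current_type: str, past_values: list, target_gen: int) -> str: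
--     """Return the move type as it was in target_gen (same semantics as get_scalar_for_gen)."""
--     entries = [pv for pv in past_values if pv.get("type") is not None]
--
--     # Same variant handling as get_scalar_for_gen
--     same_gen_variants = [
--         pv for pv in entries
--         if _vg_name(pv) in VARIANT_VERSION_GROUPS and _vg_gen(pv) == target_gen
--     ]
--     if same_gen_variants:
--         raw_type = same_gen_variants[0]["type"]["name"]
--         return TYPE_MAP.get(raw_type, raw_type.title())
--
--     relevant = [pv for pv in entries if _vg_gen(pv) > target_gen]
--
--     if not relevant:
--         return current_type
--
--     relevant.sort(key=_vg_gen)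
--     raw_type = relevant[0]["type"]["name"]
--     return TYPE_MAP.get(raw_type, raw_type.title())
-- ===== SOURCE B (Python) =====
-- VERSION_GROUP_TO_GEN = {
--     "red-blue": 1, "yellow": 1, "gold-silver": 2, "crystal": 2,
--     "ruby-sapphire": 3, "firered-leafgreen": 3, "emerald": 3,
--     "diamond-pearl": 4, "heartgold-soulsilver": 4, "platinum": 4,
--     "black-white": 5, "black-2-white-2": 5, "x-y": 6,
--     "omega-ruby-alpha-sapphire": 6, "sun-moon": 7, "ultra-sun-ultra-moon": 7,
--     "lets-go-pikachu-lets-go-eevee": 7, "sword-shield": 8,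
--     "brilliant-diamond-and-shining-pearl": 8, "legends-arceus": 8,
--     "scarlet-violet": 9, "the-teal-mask": 9, "the-indigo-disk": 9,
-- }
--
-- VARIANT_VERSION_GROUPS = {"lets-go-pikachu-lets-go-eevee", "legends-arceus"}
--
-- TYPE_MAP = {
--     "normal": "Normal", "fire": "Fire", "water": "Water", "electric": "Electric",
--     "grass": "Grass", "ice": "Ice", "fighting": "Fighting", "poison": "Poison",
--     "ground": "Ground", "flying": "Flying", "psychic": "Psychic", "bug": "Bug",
--     "rock": "Rock", "ghost": "Ghost", "dragon": "Dragon", "dark": "Dark",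
--     "steel": "Steel", "fairy": "Fairy", "stellar": "Stellar", "shadow": "Shadow",
-- }
--
--
-- def _display(pv):
--     raw = pv["type"]["name"]
--     return TYPE_MAP.get(raw, raw.title())
--
--
-- def get_type_for_gen(current_type: str, past_values: list, target_gen: int) -> str:
--     """Two direct scans with early return: no intermediate lists, no sort."""
--     # Pass 1: the first same-generation variant entry wins outright.
--     for pv in past_values:
--         if pv.get("type") is not None:
--             name = (pv.get("version_group") or {}).get("name", "")
--             if name in VARIANT_VERSION_GROUPS and VERSION_GROUP_TO_GEN.get(name, 0) == target_gen:
--                 return _display(pv)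
--     # Pass 2: keep the first future entry carrying the smallest generation.
--     best = None
--     for pv in past_values:
--         if pv.get("type") is None:
--             continue
--         gen = VERSION_GROUP_TO_GEN.get((pv.get("version_group") or {}).get("name", ""), 0)
--         if gen > target_gen and (best is None or gen < best[0]):
--             best = (gen, pv)
--     return current_type if best is None else _display(best[1])
-- ===== Notes on version B (the rewrite author's own statement) =====
-- stated objective: alternative
-- what changed: Replaced A's filtered intermediate lists plus stable sort-then-index with two direct scans with early return: pass 1 returns the first same-generation variant entry outright, pass 2 keeps the first future entry of minimal generation; the dict constants become association-list lookups.
import Mathlib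
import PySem

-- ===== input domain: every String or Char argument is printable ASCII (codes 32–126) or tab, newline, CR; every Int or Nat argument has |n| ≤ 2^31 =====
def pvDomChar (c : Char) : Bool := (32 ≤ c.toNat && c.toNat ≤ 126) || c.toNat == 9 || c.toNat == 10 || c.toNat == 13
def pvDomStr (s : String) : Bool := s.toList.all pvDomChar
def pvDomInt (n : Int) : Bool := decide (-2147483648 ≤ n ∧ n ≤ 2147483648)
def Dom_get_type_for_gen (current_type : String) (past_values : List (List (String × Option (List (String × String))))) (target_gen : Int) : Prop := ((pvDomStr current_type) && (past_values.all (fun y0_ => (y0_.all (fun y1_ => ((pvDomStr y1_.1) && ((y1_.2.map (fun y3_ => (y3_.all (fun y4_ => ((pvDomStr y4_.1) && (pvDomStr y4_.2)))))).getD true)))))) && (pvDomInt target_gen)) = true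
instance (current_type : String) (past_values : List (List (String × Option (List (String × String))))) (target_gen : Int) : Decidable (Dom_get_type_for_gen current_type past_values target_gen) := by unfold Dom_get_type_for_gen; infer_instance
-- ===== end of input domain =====

-- B replaces A's filtered intermediate lists plus stable sort-then-index by two direct scans
-- with early return: pass 1 returns the first same-generation variant entry outright, pass 2
-- keeps the first future entry of minimal generation (objective: alternative).

abbrev PVEntry := List (String × Option (List (String × String)))

-- ===== PORT A =====
-- dict.get(k) on an association list: first match (Python dicts have unique keys)
def pvGetKV {α : Type} (d : List (String × α)) (k : String) : Option α :=
  (d.find? (fun kv => kv.1 == k)).map (fun kv => kv.2)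

-- VERSION_GROUP_TO_GEN.get(name, 0): dict get, key comparisons in insertion order
def vgToGen (s : String) : Int :=
  if "red-blue" == s then 1 else if "yellow" == s then 1
  else if "gold-silver" == s then 2 else if "crystal" == s then 2
  else if "ruby-sapphire" == s then 3 else if "firered-leafgreen" == s then 3 else if "emerald" == s then 3
  else if "diamond-pearl" == s then 4 else if "heartgold-soulsilver" == s then 4 else if "platinum" == s then 4
  else if "black-white" == s then 5 else if "black-2-white-2" == s then 5
  else if "x-y" == s then 6 else if "omega-ruby-alpha-sapphire" == s then 6
  else if "sun-moon" == s then 7 else if "ultra-sun-ultra-moon" == s then 7 else if "lets-go-pikachu-lets-go-eevee" == s then 7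
  else if "sword-shield" == s then 8 else if "brilliant-diamond-and-shining-pearl" == s then 8 else if "legends-arceus" == s then 8
  else if "scarlet-violet" == s then 9 else if "the-teal-mask" == s then 9 else if "the-indigo-disk" == s then 9
  else 0

-- name in VARIANT_VERSION_GROUPS
def isVariantVG (s : String) : Bool :=
  s == "lets-go-pikachu-lets-go-eevee" || s == "legends-arceus"

-- TYPE_MAP.get(raw): dict get, key comparisons in insertion order
def typeMapGet? (s : String) : Option String :=
  if "normal" == s then some "Normal" else if "fire" == s then some "Fire"
  else if "water" == s then some "Water" else if "electric" == s then some "Electric"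
  else if "grass" == s then some "Grass" else if "ice" == s then some "Ice"
  else if "fighting" == s then some "Fighting" else if "poison" == s then some "Poison"
  else if "ground" == s then some "Ground" else if "flying" == s then some "Flying"
  else if "psychic" == s then some "Psychic" else if "bug" == s then some "Bug"
  else if "rock" == s then some "Rock" else if "ghost" == s then some "Ghost"
  else if "dragon" == s then some "Dragon" else if "dark" == s then some "Dark"
  else if "steel" == s then some "Steel" else if "fairy" == s then some "Fairy"
  else if "stellar" == s then some "Stellar" else if "shadow" == s then some "Shadow"
  else none

-- str.title(), hand-ported character by character; exact on the ASCII domain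
-- (cased characters are exactly the ASCII letters there)
def titleUpper (c : Char) : Char :=
  if 'a' ≤ c ∧ c ≤ 'z' then Char.ofNat (c.toNat - 32) else c
def titleLower (c : Char) : Char :=
  if 'A' ≤ c ∧ c ≤ 'Z' then Char.ofNat (c.toNat + 32) else c
def isAsciiAlpha (c : Char) : Bool :=
  ('a' ≤ c && c ≤ 'z') || ('A' ≤ c && c ≤ 'Z')
def titleChars : List Char → Bool → List Char
  | [], _ => []
  | c :: cs, prevAlpha =>
    (if isAsciiAlpha c then (if prevAlpha then titleLower c else titleUpper c) else c)
      :: titleChars cs (isAsciiAlpha c)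
def pyTitle (s : String) : String := String.ofList (titleChars s.toList false)

-- pv.get("type"): None iff key absent or value None
def entryType? (pv : PVEntry) : Option (List (String × String)) :=
  (pvGetKV pv "type").join
-- _vg_name(pv) = (pv.get("version_group") or {}).get("name", "")
def vgNameOf (pv : PVEntry) : String :=
  match pvGetKV pv "version_group" with
  | some (some d) => (pvGetKV d "name").getD ""
  | _ => ""
-- _vg_gen(pv)
def vgGenOf (pv : PVEntry) : Int := vgToGen (vgNameOf pv)
-- TYPE_MAP.get(raw, raw.title())
def rawToOut (raw : String) : String := (typeMapGet? raw).getD (pyTitle raw)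
-- pv["type"]["name"]; Python raises KeyError when "name" is absent — Pre_ excludes
-- exactly those inputs, so the default "" is never the claimed value
def entryRaw (pv : PVEntry) : String :=
  (pvGetKV ((entryType? pv).getD []) "name").getD ""

def get_type_for_gen (current_type : String) (past_values : List (List (String × Option (List (String × String))))) (target_gen : Int) : String :=
  let entries := past_values.filter (fun pv => (entryType? pv).isSome)
  let same_gen_variants := entries.filter
    (fun pv => isVariantVG (vgNameOf pv) && (vgGenOf pv == target_gen))
  match same_gen_variants with
  | v :: _ => rawToOut (entryRaw v)
  | [] =>
    let relevant := entries.filter (fun pv => decide (target_gen < vgGenOf pv))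
    if relevant.isEmpty then current_type
    else
      match PySem.List.sorted relevant vgGenOf with
      | r :: _ => rawToOut (entryRaw r)
      | [] => current_type

-- ===== PORT B =====
-- Source B keeps the module dicts as data; here they are association lists with a recursive lookup
def bLookup {α : Type} : List (String × α) → String → Option α
  | [], _ => none
  | (k, v) :: rest, key => if k == key then some v else bLookup rest key

def bVgTable : List (String × Int) :=
  [("red-blue", 1), ("yellow", 1), ("gold-silver", 2), ("crystal", 2),
   ("ruby-sapphire", 3), ("firered-leafgreen", 3), ("emerald", 3),
   ("diamond-pearl", 4), ("heartgold-soulsilver", 4), ("platinum", 4),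
   ("black-white", 5), ("black-2-white-2", 5), ("x-y", 6),
   ("omega-ruby-alpha-sapphire", 6), ("sun-moon", 7), ("ultra-sun-ultra-moon", 7),
   ("lets-go-pikachu-lets-go-eevee", 7), ("sword-shield", 8),
   ("brilliant-diamond-and-shining-pearl", 8), ("legends-arceus", 8),
   ("scarlet-violet", 9), ("the-teal-mask", 9), ("the-indigo-disk", 9)]

def bTypeTable : List (String × String) :=
  [("normal", "Normal"), ("fire", "Fire"), ("water", "Water"), ("electric", "Electric"),
   ("grass", "Grass"), ("ice", "Ice"), ("fighting", "Fighting"), ("poison", "Poison"),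
   ("ground", "Ground"), ("flying", "Flying"), ("psychic", "Psychic"), ("bug", "Bug"),
   ("rock", "Rock"), ("ghost", "Ghost"), ("dragon", "Dragon"), ("dark", "Dark"),
   ("steel", "Steel"), ("fairy", "Fairy"), ("stellar", "Stellar"), ("shadow", "Shadow")]

def bVariantList : List String := ["lets-go-pikachu-lets-go-eevee", "legends-arceus"]

def bType? (pv : PVEntry) : Option (List (String × String)) :=
  match bLookup pv "type" with
  | some (some t) => some t
  | _ => none

def bVgName (pv : PVEntry) : String :=
  match bLookup pv "version_group" with
  | some (some d) => (match bLookup d "name" with | some n => n | none => "")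
  | _ => ""

def bGen (pv : PVEntry) : Int :=
  (bLookup bVgTable (bVgName pv)).getD 0

-- str.title() as a left fold carrying (reversed output, previous-char-was-alpha)
def bTitleStep (st : List Char × Bool) (c : Char) : List Char × Bool :=
  let a := ('a' ≤ c && c ≤ 'z') || ('A' ≤ c && c ≤ 'Z')
  let c' := if a then
      (if st.2 then (if 'A' ≤ c ∧ c ≤ 'Z' then Char.ofNat (c.toNat + 32) else c)
       else (if 'a' ≤ c ∧ c ≤ 'z' then Char.ofNat (c.toNat - 32) else c))
    else c
  (c' :: st.1, a)
def bTitle (s : String) : String :=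
  String.ofList ((s.toList.foldl bTitleStep ([], false)).1.reverse)

-- _display(pv) of Source B
def bDisplay (pv : PVEntry) : String :=
  let raw := match bLookup (match bType? pv with | some t => t | none => []) "name" with
             | some n => n | none => ""
  match bLookup bTypeTable raw with | some t => t | none => bTitle raw

-- pass 1 of Source B: first same-generation variant entry, early return
def bFindVariant (target_gen : Int) : List PVEntry → Option PVEntry
  | [] => none
  | pv :: rest =>
    if (bType? pv).isSome && bVariantList.contains (bVgName pv) && (bGen pv == target_gen)
    then some pv else bFindVariant target_gen rest

-- pass 2 of Source B: first future entry carrying the smallest generation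
def bBestFuture (target_gen : Int) : List PVEntry → Option (Int × PVEntry) → Option (Int × PVEntry)
  | [], best => best
  | pv :: rest, best =>
    if (bType? pv).isSome then
      let g := bGen pv
      if (decide (target_gen < g) &&
          (match best with | none => true | some (bg, _) => decide (g < bg)))
      then bBestFuture target_gen rest (some (g, pv))
      else bBestFuture target_gen rest best
    else bBestFuture target_gen rest best

def get_type_for_gen_alt (current_type : String) (past_values : List (List (String × Option (List (String × String))))) (target_gen : Int) : String :=
  match bFindVariant target_gen past_values with
  | some v => bDisplay v
  | none =>
    match bBestFuture target_gen past_values none with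
    | some (_, b) => bDisplay b
    | none => current_type

-- ===== PRECONDITION & SPEC =====
-- Pre_ excludes EXACTLY the inputs on which the Python A raises KeyError: the single entry A
-- selects (the first same-generation variant entry, else the first future entry of minimal
-- generation) lacks a "name" key in its type dict. On every other input A returns normally.
def preSelected (past_values : List PVEntry) (target_gen : Int) : Option PVEntry :=
  (past_values.find? (fun pv => (entryType? pv).isSome &&
      isVariantVG (vgNameOf pv) && (vgGenOf pv == target_gen))).orElse
    (fun _ => PySem.List.min?
      (past_values.filter (fun pv => (entryType? pv).isSome && decide (target_gen < vgGenOf pv)))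
      vgGenOf)
def Pre_get_type_for_gen (current_type : String) (past_values : List (List (String × Option (List (String × String))))) (target_gen : Int) : Prop :=
  ((preSelected past_values target_gen).all
    (fun pv => (pvGetKV ((entryType? pv).getD []) "name").isSome)) = true
instance (current_type : String) (past_values : List (List (String × Option (List (String × String))))) (target_gen : Int) : Decidable (Pre_get_type_for_gen current_type past_values target_gen) := by unfold Pre_get_type_for_gen; infer_instance

def pvWitness_get_type_for_gen : String × (List (List (String × Option (List (String × String))))) × Int :=
  ("Normal", [[("type", some [("name", "fire")]), ("version_group", some [("name", "x-y")])]], 3)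

def Spec_get_type_for_gen (current_type : String) (past_values : List (List (String × Option (List (String × String))))) (target_gen : Int) (out : String) : Prop := out = get_type_for_gen_alt current_type past_values target_gen
instance (current_type : String) (past_values : List (List (String × Option (List (String × String))))) (target_gen : Int) (out : String) : Decidable (Spec_get_type_for_gen current_type past_values target_gen out) := by unfold Spec_get_type_for_gen; infer_instance

-- ===== CLAIM =====
def Claim_equal_get_type_for_gen : Prop := ∀ (current_type : String) (past_values : List (List (String × Option (List (String × String))))) (target_gen : Int), Dom_get_type_for_gen current_type past_values target_gen → Pre_get_type_for_gen current_type past_values target_gen → Spec_get_type_for_gen current_type past_values target_gen (get_type_for_gen current_type past_values target_gen)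

-- ===== LEMMAS AND PROOFS =====

-- B's lookup is A's dict get
theorem bLookup_eq_pvGetKV {α : Type} (d : List (String × α)) (k : String) :
    bLookup d k = pvGetKV d k := by
  induction d with
  | nil => rfl
  | cons kv rest ih =>
    rcases kv with ⟨k', v⟩
    by_cases h : (k' == k) = true <;> simp [bLookup, pvGetKV, List.find?, h] <;>
      simpa [pvGetKV] using ih

theorem bType?_eq (pv : PVEntry) : bType? pv = entryType? pv := by
  unfold bType? entryType?
  rw [bLookup_eq_pvGetKV]
  rcases pvGetKV pv "type" with _ | (_ | t) <;> rfl

theorem bVgName_eq (pv : PVEntry) : bVgName pv = vgNameOf pv := by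
  unfold bVgName vgNameOf
  rw [bLookup_eq_pvGetKV]
  rcases pvGetKV pv "version_group" with _ | (_ | d) <;> try rfl
  simp only [bLookup_eq_pvGetKV]
  rcases pvGetKV d "name" with _ | n <;> rfl

theorem bVgTable_eq (s : String) : (bLookup bVgTable s).getD 0 = vgToGen s := by
  unfold vgToGen
  simp only [bVgTable, bLookup]
  simp only [apply_ite (fun o : Option Int => o.getD 0), Option.getD_some, Option.getD_none]

theorem bGen_eq (pv : PVEntry) : bGen pv = vgGenOf pv := by
  unfold bGen vgGenOf
  rw [bVgName_eq, bVgTable_eq]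

theorem bVariant_eq (s : String) : bVariantList.contains s = isVariantVG s := by
  by_cases h1 : s = "lets-go-pikachu-lets-go-eevee"
  · subst h1; decide
  · by_cases h2 : s = "legends-arceus"
    · subst h2; decide
    · have b1 : (s == "lets-go-pikachu-lets-go-eevee") = false := by simpa using h1
      have b2 : (s == "legends-arceus") = false := by simpa using h2
      simp only [bVariantList, isVariantVG, b1, b2, List.contains_cons,
        List.contains_nil, Bool.or_false]

theorem bTypeTable_eq (s : String) : bLookup bTypeTable s = typeMapGet? s := by
  unfold typeMapGet?
  simp only [bTypeTable, bLookup]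

theorem bTitleStep_chars (cs : List Char) (acc : List Char) (flag : Bool) :
    (cs.foldl bTitleStep (acc, flag)).1.reverse = acc.reverse ++ titleChars cs flag := by
  induction cs generalizing acc flag with
  | nil => simp [titleChars]
  | cons c cs ih =>
    simp only [List.foldl_cons, titleChars]
    rw [show bTitleStep (acc, flag) c =
        ((if isAsciiAlpha c then (if flag then titleLower c else titleUpper c) else c) :: acc,
          isAsciiAlpha c) from by
      simp [bTitleStep, isAsciiAlpha, titleLower, titleUpper]]
    rw [ih]
    simp

theorem bTitle_eq (s : String) : bTitle s = pyTitle s := by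
  unfold bTitle pyTitle
  rw [bTitleStep_chars]
  simp

theorem bDisplay_eq (pv : PVEntry) : bDisplay pv = rawToOut (entryRaw pv) := by
  unfold bDisplay rawToOut entryRaw
  rw [bType?_eq]
  rw [show (match entryType? pv with | some t => t | none => []) = (entryType? pv).getD [] from by
        rcases entryType? pv with _ | t <;> rfl]
  rw [show (match bLookup ((entryType? pv).getD []) "name" with | some n => n | none => "") =
        (pvGetKV ((entryType? pv).getD []) "name").getD "" from by
      rw [bLookup_eq_pvGetKV]
      rcases pvGetKV ((entryType? pv).getD []) "name" with _ | n <;> rfl]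
  dsimp only
  rw [bTypeTable_eq, bTitle_eq]
  rcases typeMapGet? ((pvGetKV ((entryType? pv).getD []) "name").getD "") with _ | t <;> rfl

-- pass 1 is the head of A's same_gen_variants list
theorem bFindVariant_eq (target_gen : Int) (pvs : List PVEntry) :
    bFindVariant target_gen pvs =
      ((pvs.filter (fun pv => (entryType? pv).isSome)).filter
        (fun pv => isVariantVG (vgNameOf pv) && (vgGenOf pv == target_gen))).head? := by
  induction pvs with
  | nil => rfl
  | cons pv rest ih =>
    unfold bFindVariant
    rw [bType?_eq, bVgName_eq, bGen_eq, bVariant_eq]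
    by_cases ht : (entryType? pv).isSome = true
    · by_cases hv : (isVariantVG (vgNameOf pv) && (vgGenOf pv == target_gen)) = true
      · simp [ht, hv]
      · simp only [Bool.not_eq_true] at hv
        simp [ht, hv, ih]
    · simp only [Bool.not_eq_true] at ht
      simp [ht, ih]

-- abbreviation for the fold step that keeps (gen, entry) pairs
def bestStep (b : Option (Int × PVEntry)) (pv : PVEntry) : Option (Int × PVEntry) :=
  match b with
  | none => some (vgGenOf pv, pv)
  | some (bg, _) => if vgGenOf pv < bg then some (vgGenOf pv, pv) else b

-- pass 2 is the fold of bestStep over A's relevant list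
theorem bBestFuture_eq (target_gen : Int) (pvs : List PVEntry) (b : Option (Int × PVEntry)) :
    bBestFuture target_gen pvs b =
      ((pvs.filter (fun pv => (entryType? pv).isSome)).filter
        (fun pv => decide (target_gen < vgGenOf pv))).foldl bestStep b := by
  induction pvs generalizing b with
  | nil => rfl
  | cons pv rest ih =>
    unfold bBestFuture
    rw [bType?_eq]
    simp only [List.filter_cons]
    by_cases ht : (entryType? pv).isSome = true
    · simp only [ht, if_true]
      by_cases hg : target_gen < vgGenOf pv
      · have hstep : (if (decide (target_gen < bGen pv) &&
            (match b with | none => true | some (bg, _) => decide (bGen pv < bg)))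
              then bBestFuture target_gen rest (some (bGen pv, pv))
              else bBestFuture target_gen rest b) = bBestFuture target_gen rest (bestStep b pv) := by
          rw [bGen_eq]
          cases b with
          | none => simp [bestStep, hg]
          | some p =>
            rcases p with ⟨bg, m⟩
            by_cases hlt : vgGenOf pv < bg <;> simp [bestStep, hg, hlt]
        rw [hstep, ih, List.filter_cons_of_pos (by simpa using hg), List.foldl_cons]
      · have hstep : (if (decide (target_gen < bGen pv) &&
            (match b with | none => true | some (bg, _) => decide (bGen pv < bg)))
              then bBestFuture target_gen rest (some (bGen pv, pv))
              else bBestFuture target_gen rest b) = bBestFuture target_gen rest b := by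
          rw [bGen_eq]; simp [hg]
        rw [hstep, ih, List.filter_cons_of_neg (by simpa using hg)]
    · simp only [Bool.not_eq_true] at ht
      simp [ht, ih]

-- folding bestStep is min? with the gen carried along
theorem foldl_bestStep_eq_min? (l : List PVEntry) (acc0 : Option PVEntry) :
    l.foldl bestStep (acc0.map (fun x => (vgGenOf x, x))) =
      (l.foldl (fun acc x =>
        match acc with
        | none => some x
        | some m => if vgGenOf x < vgGenOf m then some x else some m) acc0).map
          (fun x => (vgGenOf x, x)) := by
  induction l generalizing acc0 with
  | nil => rfl
  | cons x t ih =>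
    simp only [List.foldl_cons]
    rw [← ih]
    congr 1
    cases acc0 with
    | none => rfl
    | some m =>
      by_cases hlt : vgGenOf x < vgGenOf m <;> simp [bestStep, hlt]

theorem foldl_bestStep_none_eq_min? (l : List PVEntry) :
    l.foldl bestStep none = (PySem.List.min? l vgGenOf).map (fun x => (vgGenOf x, x)) := by
  have h := foldl_bestStep_eq_min? l none
  simp only [Option.map_none] at h
  rw [h]
  unfold PySem.List.min?
  congr 1
  apply List.foldl_ext
  intro acc x hx
  cases acc with
  | none => rfl
  | some m => rfl

theorem insertBy_cons {α : Type} (lt : α → α → Bool) (x y : α) (ys : List α) :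
    PySem.List.insertBy lt x (y :: ys) =
      if lt x y then x :: y :: ys else y :: PySem.List.insertBy lt x ys := rfl

theorem head?_insertBy {α : Type} (key : α → Int) (x : α) (ys : List α) :
    (PySem.List.insertBy (fun a b => decide (key a < key b)) x ys).head? =
      (match ys.head? with
       | none => some x
       | some h => if key x < key h then some x else some h) := by
  cases ys with
  | nil => rfl
  | cons y t =>
    rw [insertBy_cons]
    by_cases h : key x < key y <;> simp [h]

theorem head?_foldl_insertBy {α : Type} (key : α → Int) (xs : List α) (acc : List α) :
    (xs.foldl (fun acc x => PySem.List.insertBy (fun a b => decide (key a < key b)) x acc) acc).head? =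
      xs.foldl (fun m x =>
        match m with
        | none => some x
        | some h => if key x < key h then some x else some h) acc.head? := by
  induction xs generalizing acc with
  | nil => rfl
  | cons x t ih =>
    simp only [List.foldl_cons]
    rw [ih]
    congr 1
    rw [head?_insertBy]

theorem head?_sorted_eq_min? {α : Type} (xs : List α) (key : α → Int) :
    (PySem.List.sorted xs key).head? = PySem.List.min? xs key := by
  rw [PySem.List.sorted_eq_foldl_insertBy, head?_foldl_insertBy]
  rfl

-- ===== VERDICT (by name: the statement is the Claim_ definition above) =====
theorem get_type_for_gen_spec : Claim_equal_get_type_for_gen := by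
  intro current_type past_values target_gen _dom _pre
  unfold Spec_get_type_for_gen get_type_for_gen get_type_for_gen_alt
  dsimp only
  rw [bFindVariant_eq, bBestFuture_eq, foldl_bestStep_none_eq_min?]
  cases hsgv : ((past_values.filter (fun pv => (entryType? pv).isSome)).filter
      (fun pv => isVariantVG (vgNameOf pv) && (vgGenOf pv == target_gen))) with
  | cons v t => simp [bDisplay_eq]
  | nil =>
    simp only [List.head?]
    cases hrel : ((past_values.filter (fun pv => (entryType? pv).isSome)).filter
        (fun pv => decide (target_gen < vgGenOf pv))) with
    | nil => simp [PySem.List.min?]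
    | cons x xt =>
      cases hm : PySem.List.min? (x :: xt) vgGenOf with
      | none => exact absurd hm (by simp [PySem.List.min?_eq_none_iff])
      | some m =>
        have hhead : (PySem.List.sorted (x :: xt) vgGenOf).head? = some m := by
          rw [head?_sorted_eq_min?, hm]
        cases hs : PySem.List.sorted (x :: xt) vgGenOf with
        | nil => rw [hs] at hhead; simp at hhead
        | cons r rt =>
          rw [hs] at hhead
          simp only [List.head?, Option.some.injEq] at hhead
          subst hhead
          simp [bDisplay_eq]
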